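-- pv_equiv track=rewrite | github.com/anshika27092003/casademo1 | streamlit_app.py | normalize_sp_payload
-- ===== SOURCE A (Python) =====
-- def normalize_sp_payload(data):
--     """Keep SP extraction aligned to strict user-required keys."""
--     payload = {
--         "supplier_name": "Not Found",
--         "clinic_name": "Not Found",
--         "invoice_date": "Not Found",
--         "tax_invoice_number": "Not Found",
--         "sub_total": "Not Found",
--         "gst_9_percent": "0.00",
--         "total_amount": "Not Found",
--         "remarks": "Not Found",
--     }
--     if isinstance(data, dict):
--         mapping = {
--             "supplier_name": data.get("supplier_name"),
--             "clinic_name": data.get("clinic_name") or data.get("bill_to"),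
--             "invoice_date": data.get("invoice_date"),
--             "tax_invoice_number": data.get("tax_invoice_number") or data.get("invoice_no"),
--             "sub_total": data.get("sub_total"),
--             "gst_9_percent": data.get("gst_9_percent") or data.get("gst_amount"),
--             "total_amount": data.get("total_amount"),
--             "remarks": data.get("remarks"),
--         }
--         for key, value in mapping.items():
--             if value not in (None, ""):
--                 payload[key] = str(value)
--     return payload
-- ===== SOURCE B (Python) =====
-- # Inverted traversal: one scan over the input's items capturing the relevant
-- # source keys, then pure construction of the output dict -- no defaults dict,
-- # no data.get, no mutation of a payload.
--
-- _CAPTURE = frozenset({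
--     "supplier_name", "clinic_name", "bill_to", "invoice_date",
--     "tax_invoice_number", "invoice_no", "sub_total",
--     "gst_9_percent", "gst_amount", "total_amount", "remarks",
-- })
--
--
-- def normalize_sp_payload(data):
--     """Keep SP extraction aligned to strict user-required keys."""
--     slots = {}
--     if isinstance(data, dict):
--         for key, value in data.items():
--             if key in _CAPTURE and key not in slots:
--                 slots[key] = value
--
--     def field(default, *candidates):
--         for k in candidates:
--             v = slots.get(k)
--             if v not in (None, ""):
--                 return str(v)
--         return default
--
--     return {
--         "supplier_name": field("Not Found", "supplier_name"),
--         "clinic_name": field("Not Found", "clinic_name", "bill_to"),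
--         "invoice_date": field("Not Found", "invoice_date"),
--         "tax_invoice_number": field("Not Found", "tax_invoice_number", "invoice_no"),
--         "sub_total": field("Not Found", "sub_total"),
--         "gst_9_percent": field("0.00", "gst_9_percent", "gst_amount"),
--         "total_amount": field("Not Found", "total_amount"),
--         "remarks": field("Not Found", "remarks"),
--     }
-- ===== Notes on version B (the rewrite author's own statement) =====
-- stated objective: alternative
-- what changed: B inverts the traversal: instead of A's defaults dict mutated by eight data.get lookups with inline or-fallbacks, B makes one scan over the input's items capturing the eleven relevant source keys into slots and then purely constructs the output dict from those slots, never calling data.get and never mutating a payload.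
import Mathlib
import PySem

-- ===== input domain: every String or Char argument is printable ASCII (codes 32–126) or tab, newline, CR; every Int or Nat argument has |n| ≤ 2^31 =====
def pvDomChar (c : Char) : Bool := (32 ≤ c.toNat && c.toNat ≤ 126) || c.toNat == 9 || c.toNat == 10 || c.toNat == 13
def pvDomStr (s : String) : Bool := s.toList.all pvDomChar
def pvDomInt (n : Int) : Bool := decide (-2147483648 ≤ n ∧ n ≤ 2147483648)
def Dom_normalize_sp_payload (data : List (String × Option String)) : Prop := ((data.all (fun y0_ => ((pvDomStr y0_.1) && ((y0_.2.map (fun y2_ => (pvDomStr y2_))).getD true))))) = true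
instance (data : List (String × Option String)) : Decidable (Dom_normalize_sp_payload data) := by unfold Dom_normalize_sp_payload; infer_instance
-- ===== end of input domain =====

-- B inverts the traversal: one scan over the input's items capturing the relevant source
-- keys, then pure construction of the output (no defaults dict, no data.get, no mutation).


-- Shared builtins: data.get(k) (dict of Optional[str] values: a stored None and a
-- missing key both give None, hence the .join), and Python truthiness / the
-- `value not in (None, "")` test, which coincide for Optional[str].
def pvGet (data : List (String × Option String)) (k : String) : Option String :=
  ((PySem.Dict.mk data).get? k).join

def pvTruthy (v : Option String) : Bool :=
  match v with
  | some s => !(s == "")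
  | none => false

-- ===== PORT A =====
-- `x or y` on Optional[str]
def pvOrA (a b : Option String) : Option String := if pvTruthy a then a else b

def normalize_sp_payload (data : List (String × Option String)) : List (String × String) :=
  let payload : PySem.Dict String String := PySem.Dict.mk
    [("supplier_name", "Not Found"), ("clinic_name", "Not Found"),
     ("invoice_date", "Not Found"), ("tax_invoice_number", "Not Found"),
     ("sub_total", "Not Found"), ("gst_9_percent", "0.00"),
     ("total_amount", "Not Found"), ("remarks", "Not Found")]
  -- isinstance(data, dict) is always true under the type convention
  let mapping : List (String × Option String) :=
    [("supplier_name", pvGet data "supplier_name"),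
     ("clinic_name", pvOrA (pvGet data "clinic_name") (pvGet data "bill_to")),
     ("invoice_date", pvGet data "invoice_date"),
     ("tax_invoice_number", pvOrA (pvGet data "tax_invoice_number") (pvGet data "invoice_no")),
     ("sub_total", pvGet data "sub_total"),
     ("gst_9_percent", pvOrA (pvGet data "gst_9_percent") (pvGet data "gst_amount")),
     ("total_amount", pvGet data "total_amount"),
     ("remarks", pvGet data "remarks")]
  (mapping.foldl
    (fun p kv => if pvTruthy kv.2 then p.insert kv.1 (kv.2.getD "") else p)
    payload).items

-- ===== PORT B =====
-- the frozenset of captured source keys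
def pvCaptureKeys : List String :=
  ["supplier_name", "clinic_name", "bill_to", "invoice_date",
   "tax_invoice_number", "invoice_no", "sub_total",
   "gst_9_percent", "gst_amount", "total_amount", "remarks"]

-- the capture scan: `if key in _CAPTURE and key not in slots: slots[key] = value`
def pvCapStep (s : PySem.Dict String (Option String)) (kv : String × Option String) :
    PySem.Dict String (Option String) :=
  if pvCaptureKeys.contains kv.1 && !(s.contains kv.1) then s.insert kv.1 kv.2 else s

def pvSlots (data : List (String × Option String)) : PySem.Dict String (Option String) :=
  data.foldl pvCapStep PySem.Dict.empty

-- slots.get(k): missing key and stored None both give None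
def pvLookup (slots : PySem.Dict String (Option String)) (k : String) : Option String :=
  (slots.get? k).join

-- `def field(default, *candidates)`: first candidate not in (None, ""), str()'d, else default
def pvField (slots : PySem.Dict String (Option String)) (default : String) :
    List String → String
  | [] => default
  | k :: rest =>
    match pvLookup slots k with
    | some s => if s == "" then pvField slots default rest else s
    | none => pvField slots default rest

-- the returned dict literal has eight distinct literal keys: it IS this assoc list
def normalize_sp_payload_alt (data : List (String × Option String)) : List (String × String) :=
  let slots := pvSlots data
  [("supplier_name", pvField slots "Not Found" ["supplier_name"]),
   ("clinic_name", pvField slots "Not Found" ["clinic_name", "bill_to"]),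
   ("invoice_date", pvField slots "Not Found" ["invoice_date"]),
   ("tax_invoice_number", pvField slots "Not Found" ["tax_invoice_number", "invoice_no"]),
   ("sub_total", pvField slots "Not Found" ["sub_total"]),
   ("gst_9_percent", pvField slots "0.00" ["gst_9_percent", "gst_amount"]),
   ("total_amount", pvField slots "Not Found" ["total_amount"]),
   ("remarks", pvField slots "Not Found" ["remarks"])]

-- ===== PRECONDITION & SPEC =====
def Spec_normalize_sp_payload (data : List (String × Option String)) (out : List (String × String)) : Prop := out = normalize_sp_payload_alt data
instance (data : List (String × Option String)) (out : List (String × String)) : Decidable (Spec_normalize_sp_payload data out) := by unfold Spec_normalize_sp_payload; infer_instance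

-- ===== CLAIM (what is proved, stated in full; the proofs are below) =====
def Claim_equal_normalize_sp_payload : Prop := ∀ (data : List (String × Option String)), Dom_normalize_sp_payload data → Spec_normalize_sp_payload data (normalize_sp_payload data)

-- ===== LEMMAS AND PROOFS =====

-- a key already present is never touched again by the capture scan
lemma pvSlots_get?_of_contains (rest : List (String × Option String))
    (acc : PySem.Dict String (Option String)) (k : String) (h : acc.contains k = true) :
    (rest.foldl pvCapStep acc).get? k = acc.get? k := by
  induction rest generalizing acc with
  | nil => rfl
  | cons kv rest ih =>
    simp only [List.foldl, pvCapStep]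
    split_ifs with hc
    · have hne : k ≠ kv.1 := by
        rintro rfl
        simp [h] at hc
      rw [ih _ (by rw [PySem.Dict.contains_insert]; simp [h]),
          PySem.Dict.get?_insert]
      simp [hne]
    · exact ih _ h

-- a captured key not yet present resolves to the first match in the remaining items
lemma pvSlots_get?_of_not_contains (rest : List (String × Option String))
    (acc : PySem.Dict String (Option String)) (k : String)
    (hk : pvCaptureKeys.contains k = true) (h : acc.contains k = false) :
    (rest.foldl pvCapStep acc).get? k = (PySem.Dict.mk rest).get? k := by
  induction rest generalizing acc with
  | nil =>
    simp only [List.foldl]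
    cases hg : acc.get? k with
    | none => rfl
    | some v => rw [PySem.Dict.contains_eq_isSome_get?, hg] at h; simp at h
  | cons kv rest ih =>
    simp only [List.foldl, pvCapStep]
    rw [PySem.Dict.get?_mk_cons]
    by_cases hkk : kv.1 = k
    · subst hkk
      have hgcond : (pvCaptureKeys.contains kv.1 && !(acc.contains kv.1)) = true := by
        rw [hk, h]; rfl
      simp only [hgcond, if_true, beq_self_eq_true]
      rw [pvSlots_get?_of_contains _ _ _
            (by rw [PySem.Dict.contains_insert]; simp),
          PySem.Dict.get?_insert_self]
    · have hb : (kv.1 == k) = false := beq_eq_false_iff_ne.mpr hkk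
      simp only [hb, Bool.false_eq_true, if_false]
      split_ifs with hc
      · refine ih _ ?_
        rw [PySem.Dict.contains_insert,
            beq_eq_false_iff_ne.mpr (Ne.symm hkk), h]
        rfl
      · exact ih _ h

-- B's lookup of a captured key is A's dict lookup
lemma pvLookup_eq (data : List (String × Option String)) (k : String)
    (hk : pvCaptureKeys.contains k = true) :
    pvLookup (pvSlots data) k = pvGet data k := by
  unfold pvLookup pvSlots pvGet
  rw [pvSlots_get?_of_not_contains _ _ _ hk (by rfl)]

-- the payload dict of A always has this literal key skeleton; only values vary
def pvD (a1 a2 a3 a4 a5 a6 a7 a8 : String) : PySem.Dict String String :=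
  PySem.Dict.mk [("supplier_name", a1), ("clinic_name", a2), ("invoice_date", a3), ("tax_invoice_number", a4), ("sub_total", a5), ("gst_9_percent", a6), ("total_amount", a7), ("remarks", a8)]

lemma pv_step1 (c : Bool) (v a1 a2 a3 a4 a5 a6 a7 a8 : String) :
    (if c = true then (pvD a1 a2 a3 a4 a5 a6 a7 a8).insert "supplier_name" v
     else pvD a1 a2 a3 a4 a5 a6 a7 a8)
      = pvD (if c then v else a1) a2 a3 a4 a5 a6 a7 a8 := by
  cases c <;> rfl
lemma pv_step2 (c : Bool) (v a1 a2 a3 a4 a5 a6 a7 a8 : String) :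
    (if c = true then (pvD a1 a2 a3 a4 a5 a6 a7 a8).insert "clinic_name" v
     else pvD a1 a2 a3 a4 a5 a6 a7 a8)
      = pvD a1 (if c then v else a2) a3 a4 a5 a6 a7 a8 := by
  cases c <;> rfl
lemma pv_step3 (c : Bool) (v a1 a2 a3 a4 a5 a6 a7 a8 : String) :
    (if c = true then (pvD a1 a2 a3 a4 a5 a6 a7 a8).insert "invoice_date" v
     else pvD a1 a2 a3 a4 a5 a6 a7 a8)
      = pvD a1 a2 (if c then v else a3) a4 a5 a6 a7 a8 := by
  cases c <;> rfl
lemma pv_step4 (c : Bool) (v a1 a2 a3 a4 a5 a6 a7 a8 : String) :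
    (if c = true then (pvD a1 a2 a3 a4 a5 a6 a7 a8).insert "tax_invoice_number" v
     else pvD a1 a2 a3 a4 a5 a6 a7 a8)
      = pvD a1 a2 a3 (if c then v else a4) a5 a6 a7 a8 := by
  cases c <;> rfl
lemma pv_step5 (c : Bool) (v a1 a2 a3 a4 a5 a6 a7 a8 : String) :
    (if c = true then (pvD a1 a2 a3 a4 a5 a6 a7 a8).insert "sub_total" v
     else pvD a1 a2 a3 a4 a5 a6 a7 a8)
      = pvD a1 a2 a3 a4 (if c then v else a5) a6 a7 a8 := by
  cases c <;> rfl
lemma pv_step6 (c : Bool) (v a1 a2 a3 a4 a5 a6 a7 a8 : String) :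
    (if c = true then (pvD a1 a2 a3 a4 a5 a6 a7 a8).insert "gst_9_percent" v
     else pvD a1 a2 a3 a4 a5 a6 a7 a8)
      = pvD a1 a2 a3 a4 a5 (if c then v else a6) a7 a8 := by
  cases c <;> rfl
lemma pv_step7 (c : Bool) (v a1 a2 a3 a4 a5 a6 a7 a8 : String) :
    (if c = true then (pvD a1 a2 a3 a4 a5 a6 a7 a8).insert "total_amount" v
     else pvD a1 a2 a3 a4 a5 a6 a7 a8)
      = pvD a1 a2 a3 a4 a5 a6 (if c then v else a7) a8 := by
  cases c <;> rfl
lemma pv_step8 (c : Bool) (v a1 a2 a3 a4 a5 a6 a7 a8 : String) :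
    (if c = true then (pvD a1 a2 a3 a4 a5 a6 a7 a8).insert "remarks" v
     else pvD a1 a2 a3 a4 a5 a6 a7 a8)
      = pvD a1 a2 a3 a4 a5 a6 a7 (if c then v else a8) := by
  cases c <;> rfl

-- evaluating A's update loop for arbitrary mapping values
lemma pv_A_eval (m1 m2 m3 m4 m5 m6 m7 m8 : Option String) :
    (([("supplier_name", m1), ("clinic_name", m2), ("invoice_date", m3), ("tax_invoice_number", m4), ("sub_total", m5), ("gst_9_percent", m6), ("total_amount", m7), ("remarks", m8)].foldl
        (fun (p : PySem.Dict String String) kv =>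
          if pvTruthy kv.2 then p.insert kv.1 (kv.2.getD "") else p)
        (pvD "Not Found" "Not Found" "Not Found" "Not Found" "Not Found" "0.00" "Not Found" "Not Found")).items)
    = [("supplier_name", if pvTruthy m1 then m1.getD "" else "Not Found"),
       ("clinic_name", if pvTruthy m2 then m2.getD "" else "Not Found"),
       ("invoice_date", if pvTruthy m3 then m3.getD "" else "Not Found"),
       ("tax_invoice_number", if pvTruthy m4 then m4.getD "" else "Not Found"),
       ("sub_total", if pvTruthy m5 then m5.getD "" else "Not Found"),
       ("gst_9_percent", if pvTruthy m6 then m6.getD "" else "0.00"),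
       ("total_amount", if pvTruthy m7 then m7.getD "" else "Not Found"),
       ("remarks", if pvTruthy m8 then m8.getD "" else "Not Found")] := by
  simp only [List.foldl]
  rw [pv_step1, pv_step2, pv_step3, pv_step4, pv_step5, pv_step6, pv_step7, pv_step8]
  rfl

-- per-field agreement, single candidate
lemma pv_field_one (slots : PySem.Dict String (Option String)) (d k : String) :
    (if pvTruthy (pvLookup slots k) then (pvLookup slots k).getD "" else d)
      = pvField slots d [k] := by
  simp only [pvField]
  cases h : pvLookup slots k with
  | none => simp [pvTruthy]
  | some s => by_cases hs : s = "" <;> simp [pvTruthy, hs]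

-- per-field agreement, two candidates with `or`
lemma pv_field_two (slots : PySem.Dict String (Option String)) (d k1 k2 : String) :
    (if pvTruthy (pvOrA (pvLookup slots k1) (pvLookup slots k2))
       then (pvOrA (pvLookup slots k1) (pvLookup slots k2)).getD "" else d)
      = pvField slots d [k1, k2] := by
  simp only [pvField]
  cases h1 : pvLookup slots k1 with
  | none =>
    cases h2 : pvLookup slots k2 with
    | none => simp [pvOrA, pvTruthy]
    | some t => by_cases ht : t = "" <;> simp [pvOrA, pvTruthy, ht]
  | some s =>
    by_cases hs : s = ""
    · cases h2 : pvLookup slots k2 with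
      | none => simp [pvOrA, pvTruthy, hs]
      | some t => by_cases ht : t = "" <;> simp [pvOrA, pvTruthy, hs, ht]
    · simp [pvOrA, pvTruthy, hs]

-- ===== VERDICT (by name: the statement is the Claim_ definition above) =====
theorem normalize_sp_payload_spec : Claim_equal_normalize_sp_payload := by
  intro data _
  show normalize_sp_payload data = normalize_sp_payload_alt data
  rw [normalize_sp_payload, normalize_sp_payload_alt]
  rw [show PySem.Dict.mk
        [("supplier_name", "Not Found"), ("clinic_name", "Not Found"),
         ("invoice_date", "Not Found"), ("tax_invoice_number", "Not Found"),
         ("sub_total", "Not Found"), ("gst_9_percent", "0.00"),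
         ("total_amount", "Not Found"), ("remarks", "Not Found")]
      = pvD "Not Found" "Not Found" "Not Found" "Not Found" "Not Found" "0.00" "Not Found" "Not Found" from rfl]
  rw [pv_A_eval]
  rw [show pvGet data "supplier_name" = pvLookup (pvSlots data) "supplier_name" from (pvLookup_eq data _ (by rfl)).symm,
      show pvGet data "clinic_name" = pvLookup (pvSlots data) "clinic_name" from (pvLookup_eq data _ (by rfl)).symm,
      show pvGet data "bill_to" = pvLookup (pvSlots data) "bill_to" from (pvLookup_eq data _ (by rfl)).symm,
      show pvGet data "invoice_date" = pvLookup (pvSlots data) "invoice_date" from (pvLookup_eq data _ (by rfl)).symm,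
      show pvGet data "tax_invoice_number" = pvLookup (pvSlots data) "tax_invoice_number" from (pvLookup_eq data _ (by rfl)).symm,
      show pvGet data "invoice_no" = pvLookup (pvSlots data) "invoice_no" from (pvLookup_eq data _ (by rfl)).symm,
      show pvGet data "sub_total" = pvLookup (pvSlots data) "sub_total" from (pvLookup_eq data _ (by rfl)).symm,
      show pvGet data "gst_9_percent" = pvLookup (pvSlots data) "gst_9_percent" from (pvLookup_eq data _ (by rfl)).symm,
      show pvGet data "gst_amount" = pvLookup (pvSlots data) "gst_amount" from (pvLookup_eq data _ (by rfl)).symm,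
      show pvGet data "total_amount" = pvLookup (pvSlots data) "total_amount" from (pvLookup_eq data _ (by rfl)).symm,
      show pvGet data "remarks" = pvLookup (pvSlots data) "remarks" from (pvLookup_eq data _ (by rfl)).symm]
  rw [pv_field_one, pv_field_two, pv_field_one, pv_field_two, pv_field_one,
      pv_field_two, pv_field_one, pv_field_one]
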